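-- pv_equiv track=rewrite | github.com/Nocotov77/py_gerda | 17_Другие методы списков и строк/1714_Три в ряд/main.py | check_removal
-- ===== SOURCE A (Python) =====
-- def check_removal(board):
--     n = len(board)
--     removal_happened = False
--     i = 0
--     while i < n:
--         if board[i] != '_':
--             j = i + 1
--             while j < n and board[j] == board[i]:
--                 j += 1
--             if (j - i) >= 3:
--                 for k in range(i, j):
--                     board[k] = '_'
--                 removal_happened = True
--             i = j
--         else:
--             i += 1
--     return removal_happened
-- ===== SOURCE B (Python) =====
-- def check_removal(board):
--     n = len(board)
--     remove = [False] * n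
--     for i in range(n - 2):
--         if board[i] != '_' and board[i] == board[i + 1] == board[i + 2]:
--             remove[i] = remove[i + 1] = remove[i + 2] = True
--     for k in range(n):
--         if remove[k]:
--             board[k] = '_'
--     return any(remove)
-- ===== Notes on version B (the rewrite author's own statement) =====
-- stated objective: alternative
-- what changed: B replaces A's in-place maximal-run scan (nested while loops that find each run's end and blank it immediately) by a two-pass mask: one pass over fixed length-3 windows builds a boolean removal mask, then a second pass blanks the masked cells and returns any(mask).
import Mathlib
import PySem

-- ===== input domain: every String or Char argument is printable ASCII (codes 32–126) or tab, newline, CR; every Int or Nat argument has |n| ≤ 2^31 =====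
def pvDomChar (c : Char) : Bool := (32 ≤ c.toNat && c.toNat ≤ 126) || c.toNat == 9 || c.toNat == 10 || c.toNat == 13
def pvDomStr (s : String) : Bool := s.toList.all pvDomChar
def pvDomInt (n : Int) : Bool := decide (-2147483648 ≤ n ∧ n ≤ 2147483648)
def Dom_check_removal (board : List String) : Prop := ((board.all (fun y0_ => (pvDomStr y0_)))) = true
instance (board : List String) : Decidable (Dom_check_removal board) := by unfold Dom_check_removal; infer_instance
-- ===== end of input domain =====

-- B replaces A's maximal-run scan with a fixed length-3 window mask followed by one blanking pass
-- ("alternative" objective, same linear cost). Both Pythons mutate `board` identically; here only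
-- the RETURN value is proved equal.

-- ===== PORT A =====
-- inner 'while j < n and board[j] == board[i]: j += 1' (v = board[i]); returns the final j
def runEnd (b : List String) (v : String) (n j : Nat) : Nat :=
  if h : j < n ∧ b.getD j "" = v then runEnd b v n (j + 1) else j
termination_by n - j
decreasing_by omega

-- needed by loopA's termination proof
theorem runEnd_ge (b : List String) (v : String) (n j : Nat) : j ≤ runEnd b v n j := by
  unfold runEnd
  split
  · exact Nat.le_trans (Nat.le_succ j) (runEnd_ge b v n (j + 1))
  · exact Nat.le_refl j
termination_by n - j
decreasing_by omega

-- 'for k in range(i, j): board[k] = "_"'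
def blankRange (b : List String) (i j : Nat) : List String :=
  (List.range' i (j - i)).foldl (fun acc k => acc.set k "_") b

-- outer while loop of A, carrying the (mutated) board, the index i and the flag
def loopA (b : List String) (n i : Nat) (flag : Bool) : Bool :=
  if _h : i < n then
    if b.getD i "" ≠ "_" then
      if 3 ≤ runEnd b (b.getD i "") n (i + 1) - i then
        loopA (blankRange b i (runEnd b (b.getD i "") n (i + 1))) n
          (runEnd b (b.getD i "") n (i + 1)) true
      else loopA b n (runEnd b (b.getD i "") n (i + 1)) flag
    else loopA b n (i + 1) flag
  else flag
termination_by n - i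
decreasing_by
  · have := runEnd_ge b (b.getD i "") n (i + 1); omega
  · have := runEnd_ge b (b.getD i "") n (i + 1); omega
  · omega

def check_removal (board : List String) : Bool :=
  loopA board board.length 0 false

-- ===== PORT B =====
-- first pass of Source B: build the boolean removal mask over fixed length-3 windows
def maskStep (b : List String) (m : List Bool) (i : Nat) : List Bool :=
  if b.getD i "" ≠ "_" ∧ b.getD i "" = b.getD (i + 1) "" ∧ b.getD (i + 1) "" = b.getD (i + 2) "" then
    ((m.set i true).set (i + 1) true).set (i + 2) true
  else m

-- Source B's second pass writes '_' into board and is not visible in the return value; return any(remove)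
def check_removal_alt (board : List String) : Bool :=
  ((List.range (board.length - 2)).foldl (maskStep board)
    (List.replicate board.length false)).any id

-- ===== PRECONDITION & SPEC =====
def Spec_check_removal (board : List String) (out : Bool) : Prop := out = check_removal_alt board
instance (board : List String) (out : Bool) : Decidable (Spec_check_removal board out) := by unfold Spec_check_removal; infer_instance

-- ===== CLAIM (what is proved, stated in full; the proofs are below) =====
def Claim_equal_check_removal : Prop := ∀ (board : List String), Dom_check_removal board → Spec_check_removal board (check_removal board)

-- ===== LEMMAS AND PROOFS =====

-- a length-3 window of equal non-'_' entries starting at k (Bool-valued proof helper)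
def winb (b : List String) (k : Nat) : Bool :=
  decide (k + 2 < b.length) && decide (b.getD k "" ≠ "_") &&
  decide (b.getD k "" = b.getD (k + 1) "") && decide (b.getD (k + 1) "" = b.getD (k + 2) "")

theorem winb_true (b : List String) (k : Nat) :
    winb b k = true ↔ k + 2 < b.length ∧ b.getD k "" ≠ "_" ∧
      b.getD k "" = b.getD (k + 1) "" ∧ b.getD (k + 1) "" = b.getD (k + 2) "" := by
  simp [winb, and_assoc]

theorem runEnd_le (b : List String) (v : String) (n j : Nat) (h : j ≤ n) : runEnd b v n j ≤ n := by
  unfold runEnd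
  split
  · exact runEnd_le b v n (j + 1) (by omega)
  · exact h
termination_by n - j
decreasing_by omega

theorem runEnd_mem (b : List String) (v : String) (n j k : Nat) (h1 : j ≤ k)
    (h2 : k < runEnd b v n j) : b.getD k "" = v := by
  rw [runEnd] at h2
  split at h2
  · rename_i hc
    rcases Nat.eq_or_lt_of_le h1 with he | hl
    · exact he ▸ hc.2
    · exact runEnd_mem b v n (j + 1) k hl h2
  · omega
termination_by n - j
decreasing_by omega

theorem runEnd_stop (b : List String) (v : String) (n j : Nat)
    (h : runEnd b v n j < n) : b.getD (runEnd b v n j) "" ≠ v := by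
  by_cases hc : j < n ∧ b.getD j "" = v
  · rw [runEnd, dif_pos hc] at h ⊢
    exact runEnd_stop b v n (j + 1) h
  · rw [runEnd, dif_neg hc] at h ⊢
    intro hv
    exact hc ⟨h, hv⟩
termination_by n - j
decreasing_by omega

theorem blankRange_length (b : List String) (i j : Nat) :
    (blankRange b i j).length = b.length := by
  unfold blankRange
  induction (List.range' i (j - i)) generalizing b with
  | nil => rfl
  | cons x xs ih => simpa [List.foldl_cons] using ih (b.set x "_")

-- existence of a window at some k ≥ i (Bool-valued)
def AWb (b : List String) (i : Nat) : Bool :=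
  (List.range b.length).any (fun k => decide (i ≤ k) && winb b k)

theorem AWb_true (b : List String) (i : Nat) :
    AWb b i = true ↔ ∃ k, i ≤ k ∧ winb b k = true := by
  simp only [AWb, List.any_eq_true, List.mem_range, Bool.and_eq_true, decide_eq_true_eq]
  constructor
  · rintro ⟨k, _, hik, hw⟩; exact ⟨k, hik, hw⟩
  · rintro ⟨k, hik, hw⟩
    have := (winb_true b k).mp hw
    exact ⟨k, by omega, hik, hw⟩

theorem AWb_step (b : List String) (i : Nat) (h : winb b i = false) :
    AWb b i = AWb b (i + 1) := by
  rw [Bool.eq_iff_iff, AWb_true, AWb_true]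
  constructor
  · rintro ⟨k, hik, hw⟩
    rcases Nat.eq_or_lt_of_le hik with he | hl
    · rw [← he, h] at hw; cases hw
    · exact ⟨k, hl, hw⟩
  · rintro ⟨k, hik, hw⟩
    exact ⟨k, by omega, hw⟩

theorem AWb_false_of_ge (b : List String) (i : Nat) (h : b.length ≤ i) : AWb b i = false := by
  rw [← Bool.not_eq_true, AWb_true]
  rintro ⟨k, hik, hw⟩
  have := (winb_true b k).mp hw
  omega

-- the main invariant of A's outer loop, by induction on the fuel d ≥ n - i
theorem loopA_eq (d : Nat) : ∀ (n i : Nat) (b : List String) (flag : Bool),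
    n - i ≤ d → n = b.length → loopA b n i flag = (flag || AWb b i) := by
  induction d with
  | zero =>
    intro n i b flag hd hn
    rw [loopA]
    have hi : ¬ i < n := by omega
    rw [dif_neg hi, AWb_false_of_ge b i (by omega), Bool.or_false]
  | succ d ih =>
    intro n i b flag hd hn
    rw [loopA]
    split
    · rename_i hi
      split
      · rename_i hne
        set v := b.getD i "" with hv
        set j := runEnd b v n (i + 1) with hj
        have hji : i + 1 ≤ j := runEnd_ge b v n (i + 1)
        have hjn : j ≤ n := runEnd_le b v n (i + 1) (by omega)
        split
        · rename_i h3
          rw [ih n j _ true (by omega) (by rw [blankRange_length]; exact hn)]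
          have hwin : winb b i = true := by
            refine (winb_true b i).mpr ⟨by omega, hne, ?_, ?_⟩
            · exact (runEnd_mem b v n (i + 1) (i + 1) (le_refl _) (by omega)).symm
            · rw [runEnd_mem b v n (i + 1) (i + 1) (le_refl _) (by omega),
                runEnd_mem b v n (i + 1) (i + 2) (by omega) (by omega)]
          have haw : AWb b i = true := (AWb_true b i).mpr ⟨i, le_refl _, hwin⟩
          rw [haw, Bool.true_or, Bool.or_true]
        · rename_i h3
          rw [ih n j b flag (by omega) hn]
          have hcases : j = i + 1 ∨ j = i + 2 := by omega
          have hwi : winb b i = false := by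
            rw [← Bool.not_eq_true, winb_true]
            rintro ⟨hlen, _, h12, h23⟩
            rcases hcases with he | he
            · have := runEnd_stop b v n (i + 1)
              rw [← hj, he] at this
              by_cases hlt : i + 1 < n
              · exact this hlt h12.symm
              · omega
            · have := runEnd_stop b v n (i + 1)
              rw [← hj, he] at this
              by_cases hlt : i + 2 < n
              · exact this hlt (by rw [← h23, ← h12])
              · omega
          congr 1
          rcases hcases with he | he
          · rw [he]
            exact (AWb_step b i hwi).symm
          · have hwi1 : winb b (i + 1) = false := by
              rw [← Bool.not_eq_true, winb_true]
              rintro ⟨hlen, _, h12, _⟩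
              have hm : b.getD (i + 1) "" = v :=
                runEnd_mem b v n (i + 1) (i + 1) (le_refl _) (by omega)
              have := runEnd_stop b v n (i + 1)
              rw [← hj, he] at this
              by_cases hlt : i + 2 < n
              · exact this hlt (by rw [← h12, hm])
              · omega
            rw [he]
            exact ((AWb_step b i hwi).trans (AWb_step b (i + 1) hwi1)).symm
      · rename_i hne
        rw [ih n (i + 1) b flag (by omega) hn]
        congr 1
        refine (AWb_step b i ?_).symm
        rw [← Bool.not_eq_true, winb_true]
        rintro ⟨_, hq, _⟩
        simp at hne
        exact hq hne
    · rename_i hi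
      rw [AWb_false_of_ge b i (by omega), Bool.or_false]

-- B side: semantics of the mask fold
theorem any_set_true (l : List Bool) (i : Nat) (h : i < l.length) :
    (l.set i true).any id = true := by
  simp only [List.any_eq_true, id]
  refine ⟨true, ?_, rfl⟩
  rw [List.mem_iff_getElem]
  exact ⟨i, by simpa using h, by simp⟩

theorem maskStep_length (b : List String) (m : List Bool) (i : Nat) :
    (maskStep b m i).length = m.length := by
  unfold maskStep; split <;> simp

theorem mask_fold_length (b : List String) (t : Nat) (m : List Bool) :
    ((List.range t).foldl (maskStep b) m).length = m.length := by
  induction t generalizing m with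
  | zero => rfl
  | succ t ih =>
    rw [List.range_succ, List.foldl_append, List.foldl_cons, List.foldl_nil, maskStep_length, ih]

theorem mask_any (b : List String) (t : Nat) (m : List Bool)
    (ht : t + 2 ≤ b.length) (hm : m.length = b.length) :
    ((List.range t).foldl (maskStep b) m).any id
      = (m.any id || decide (∃ i, i < t ∧ winb b i = true)) := by
  induction t with
  | zero => simp
  | succ t ih =>
    rw [List.range_succ, List.foldl_append, List.foldl_cons, List.foldl_nil]
    rw [maskStep]
    split
    · rename_i hc
      have hwin : winb b t = true := (winb_true b t).mpr ⟨by omega, hc.1, hc.2.1, hc.2.2⟩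
      have hlen : ((((List.range t).foldl (maskStep b) m).set t true).set (t + 1) true).length
          = b.length := by
        simp [mask_fold_length, hm]
      rw [any_set_true _ (t + 2) (by omega)]
      have hex : ∃ i, i < t + 1 ∧ winb b i = true := ⟨t, by omega, hwin⟩
      rw [decide_eq_true hex, Bool.or_true]
    · rename_i hc
      rw [ih (by omega)]
      have hwt : winb b t = false := by
        rw [← Bool.not_eq_true, winb_true]
        rintro ⟨_, h1, h2, h3⟩
        exact hc ⟨h1, h2, h3⟩
      congr 1
      rw [decide_eq_decide]
      constructor
      · rintro ⟨i, hi, hw⟩; exact ⟨i, by omega, hw⟩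
      · rintro ⟨i, hi, hw⟩
        rcases Nat.lt_succ_iff_lt_or_eq.mp hi with hl | he
        · exact ⟨i, hl, hw⟩
        · rw [he, hwt] at hw; cases hw

theorem alt_eq (b : List String) : check_removal_alt b = AWb b 0 := by
  unfold check_removal_alt
  by_cases h2 : 2 ≤ b.length
  · rw [mask_any b (b.length - 2) (List.replicate b.length false) (by omega) (by simp)]
    have hrep : (List.replicate b.length false).any id = false := by simp
    rw [hrep, Bool.false_or, Bool.eq_iff_iff, decide_eq_true_eq, AWb_true]
    constructor
    · rintro ⟨i, _, hw⟩; exact ⟨i, Nat.zero_le _, hw⟩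
    · rintro ⟨i, _, hw⟩
      have := (winb_true b i).mp hw
      exact ⟨i, by omega, hw⟩
  · have hb : b.length - 2 = 0 := by omega
    rw [hb]
    have hnaw : AWb b 0 = false := by
      rw [← Bool.not_eq_true, AWb_true]
      rintro ⟨k, _, hw⟩
      have := (winb_true b k).mp hw
      omega
    simp [hnaw]

-- ===== VERDICT (by name: the statement is the Claim_ definition above) =====
theorem check_removal_spec : Claim_equal_check_removal := by
  intro board _
  unfold Spec_check_removal check_removal
  rw [loopA_eq board.length board.length 0 board false (by omega) rfl, alt_eq]
  rw [Bool.false_or]
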